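-- pv_equiv track=rewrite | github.com/TUB-NLP-OpenData/scientific_ner | code/bert_model.py | compute_TP_P
-- ===== SOURCE A (Python) =====
-- def compute_TP_P(guessed, correct):
--     """
--     see: https://github.com/UKPLab/deeplearning4nlp-tutorial/blob/master/2015-10_Lecture/Lecture3/code/BIOF1Validation.py
--     """
--     assert len(guessed) == len(correct)
--     correctCount = 0
--     count = 0
--
--     idx = 0
--     while idx < len(guessed):
--         if guessed[idx][0] == "B":  # A new chunk starts
--             count += 1
--
--             if guessed[idx] == correct[idx]:
--                 idx += 1
--                 correctlyFound = True
--
--                 while (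
--                     idx < len(guessed) and guessed[idx][0] == "I"
--                 ):  # Scan until it no longer starts with I
--                     if guessed[idx] != correct[idx]:
--                         correctlyFound = False
--
--                     idx += 1
--
--                 if idx < len(guessed):
--                     if correct[idx][0] == "I":  # The chunk in correct was longer
--                         correctlyFound = False
--
--                 if correctlyFound:
--                     correctCount += 1
--             else:
--                 idx += 1
--         else:
--             idx += 1
--
--     return correctCount, count
-- ===== SOURCE B (Python) =====
-- def _span_matches(guessed, correct, start, end):
--     k = start
--     while k <= end:
--         if guessed[k] != correct[k]:
--             return False
--         k += 1
--     return True
--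
--
-- def _span_ok(guessed, correct, start, end):
--     ok = _span_matches(guessed, correct, start, end)
--     if ok and end + 1 < len(guessed) and correct[end + 1][0] == "I":
--         ok = False  # the chunk in correct was longer
--     return ok
--
--
-- def compute_TP_P(guessed, correct):
--     assert len(guessed) == len(correct)
--     n = len(guessed)
--
--     # Pass 1: collect chunk spans (start, end) from guessed only.
--     spans = []
--     idx = 0
--     while idx < n:
--         if guessed[idx][0] == "B":
--             end = idx
--             while end + 1 < n and guessed[end + 1][0] == "I":
--                 end += 1
--             spans.append((idx, end))
--             idx = end + 1
--         else:
--             idx += 1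
--
--     # Pass 2: judge each span against correct.
--     correctCount = 0
--     for start, end in spans:
--         if _span_ok(guessed, correct, start, end):
--             correctCount += 1
--
--     return correctCount, len(spans)
-- ===== Notes on version B (the rewrite author's own statement) =====
-- stated objective: alternative
-- what changed: A's single interleaved while-loop with a correctlyFound flag is replaced by two passes: first collect all chunk spans (start,end) from guessed alone, then judge each span against correct by comparing the span's tags and the tag right after it.
-- outside the precondition, e.g. on compute_TP_P(['O'], ['']): A returns (0, 0), B returns (0, 0)
import Mathlib
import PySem

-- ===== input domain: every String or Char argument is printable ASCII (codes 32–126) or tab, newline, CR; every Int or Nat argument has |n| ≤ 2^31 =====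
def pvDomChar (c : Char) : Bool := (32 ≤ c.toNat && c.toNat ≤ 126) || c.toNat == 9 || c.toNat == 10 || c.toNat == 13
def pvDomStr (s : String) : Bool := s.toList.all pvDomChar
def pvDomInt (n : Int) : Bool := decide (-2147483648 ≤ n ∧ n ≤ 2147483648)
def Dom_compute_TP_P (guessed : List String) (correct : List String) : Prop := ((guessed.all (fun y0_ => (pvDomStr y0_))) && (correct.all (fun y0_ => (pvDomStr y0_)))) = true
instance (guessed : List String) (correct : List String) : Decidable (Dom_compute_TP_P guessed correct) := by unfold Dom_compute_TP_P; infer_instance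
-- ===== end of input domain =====

-- B replaces A's single interleaved scan (with a correctlyFound flag maintained across an inner
-- while-loop) by two passes: collect all chunk spans from guessed first, then judge each span
-- against correct; objective: alternative decomposition, same O(n) cost.

-- shared tiny helper: tag[0] == c  (Python's tag[0] raises on "", excluded by Pre_)
def pvHeadIs (s : String) (c : Char) : Bool := PySem.Str.pyGet? s 0 == some c

-- ===== PORT A =====
-- inner while: scan I-tags, clearing found on a mismatch; returns (new idx, found)
def innerScanA (guessed correct : List String) (idx : Nat) (found : Bool) : Nat × Bool :=
  if idx < guessed.length then
    if pvHeadIs (guessed.getD idx "") 'I' then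
      innerScanA guessed correct (idx + 1)
        (if guessed.getD idx "" == correct.getD idx "" then found else false)
    else (idx, found)
  else (idx, found)
termination_by guessed.length - idx
decreasing_by exact Nat.sub_succ_lt_self _ _ (by assumption)

theorem innerScanA_fst_ge (guessed correct : List String) (idx : Nat) (found : Bool) :
    idx ≤ (innerScanA guessed correct idx found).1 := by
  fun_induction innerScanA guessed correct idx found with
  | case1 idx found h1 h2 ih => exact Nat.le_of_succ_le ih
  | case2 idx found h1 h2 => exact Nat.le_refl idx
  | case3 idx found h1 => exact Nat.le_refl idx

-- the outer while-loop of A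
def loopA (guessed correct : List String) (idx : Nat) (correctCount count : Int) : Int × Int :=
  if idx < guessed.length then
    if pvHeadIs (guessed.getD idx "") 'B' then
      if guessed.getD idx "" == correct.getD idx "" then
        let r := innerScanA guessed correct (idx + 1) true
        let found :=
          if r.1 < guessed.length then
            if pvHeadIs (correct.getD r.1 "") 'I' then false else r.2
          else r.2
        loopA guessed correct r.1 (if found then correctCount + 1 else correctCount) (count + 1)
      else loopA guessed correct (idx + 1) correctCount (count + 1)
    else loopA guessed correct (idx + 1) correctCount count
  else (correctCount, count)
termination_by guessed.length - idx
decreasing_by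
  · exact Nat.lt_of_le_of_lt
      (Nat.sub_le_sub_left (innerScanA_fst_ge guessed correct (idx + 1) true) guessed.length)
      (Nat.sub_succ_lt_self _ _ (by assumption))
  · exact Nat.sub_succ_lt_self _ _ (by assumption)
  · exact Nat.sub_succ_lt_self _ _ (by assumption)

-- the assert corresponds to Pre_ (length equality); A's loop itself
def compute_TP_P (guessed : List String) (correct : List String) : Int × Int :=
  loopA guessed correct 0 0 0

-- ===== PORT B =====
-- inner while of pass 1: extend end over following I-tags
def chunkEndB (guessed : List String) (e : Nat) : Nat :=
  if e + 1 < guessed.length then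
    if pvHeadIs (guessed.getD (e + 1) "") 'I' then chunkEndB guessed (e + 1) else e
  else e
termination_by guessed.length - e
decreasing_by exact Nat.sub_succ_lt_self _ _ (Nat.lt_of_succ_lt (by assumption))

theorem chunkEndB_ge (guessed : List String) (e : Nat) : e ≤ chunkEndB guessed e := by
  fun_induction chunkEndB guessed e with
  | case1 e h1 h2 ih => exact Nat.le_trans (Nat.le_succ e) ih
  | case2 e h1 h2 => exact Nat.le_refl e
  | case3 e h1 => exact Nat.le_refl e

-- pass 1: the list of chunk spans (start, end)
def spansB (guessed : List String) (idx : Nat) : List (Nat × Nat) :=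
  if idx < guessed.length then
    if pvHeadIs (guessed.getD idx "") 'B' then
      (idx, chunkEndB guessed idx) :: spansB guessed (chunkEndB guessed idx + 1)
    else spansB guessed (idx + 1)
  else []
termination_by guessed.length - idx
decreasing_by
  · exact Nat.lt_of_le_of_lt
      (Nat.sub_le_sub_left (Nat.succ_le_succ (chunkEndB_ge guessed idx)) guessed.length)
      (Nat.sub_succ_lt_self _ _ (by assumption))
  · exact Nat.sub_succ_lt_self _ _ (by assumption)

-- helper _span_matches: guessed[k] == correct[k] for all start ≤ k ≤ end
def spanMatchesB (guessed correct : List String) (k e : Nat) : Bool :=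
  if k ≤ e then
    if guessed.getD k "" == correct.getD k "" then spanMatchesB guessed correct (k + 1) e
    else false
  else true
termination_by e + 1 - k
decreasing_by exact Nat.sub_succ_lt_self _ _ (Nat.lt_succ_of_le (by assumption))

-- helper _span_ok: span fully matches and the chunk in correct is not longer
def spanOkB (guessed correct : List String) (s e : Nat) : Bool :=
  let ok := spanMatchesB guessed correct s e
  if ok && decide (e + 1 < guessed.length) && pvHeadIs (correct.getD (e + 1) "") 'I' then false
  else ok

def compute_TP_P_alt (guessed : List String) (correct : List String) : Int × Int :=
  let spans := spansB guessed 0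
  let correctCount :=
    spans.foldl (fun acc p => if spanOkB guessed correct p.1 p.2 then acc + 1 else acc) (0 : Int)
  (correctCount, (spans.length : Int))

-- ===== PRECONDITION & SPEC =====
-- Pre_ excludes inputs on which Python A raises: length mismatches (the assert) and empty-string
-- tags ("" makes tag[0] an IndexError); it is slightly narrower than A's raising set, since an
-- empty tag in correct at a position A happens never to inspect is excluded too (see claim cites).
def Pre_compute_TP_P (guessed : List String) (correct : List String) : Prop :=
  guessed.length = correct.length ∧ (∀ s ∈ guessed, s ≠ "") ∧ (∀ s ∈ correct, s ≠ "")
instance (guessed : List String) (correct : List String) : Decidable (Pre_compute_TP_P guessed correct) := by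
  unfold Pre_compute_TP_P; infer_instance

def pvWitness_compute_TP_P : List String × List String :=
  (["B-X", "I-X", "O"], ["B-X", "I-X", "O"])

def Spec_compute_TP_P (guessed : List String) (correct : List String) (out : Int × Int) : Prop := out = compute_TP_P_alt guessed correct
instance (guessed : List String) (correct : List String) (out : Int × Int) : Decidable (Spec_compute_TP_P guessed correct out) := by unfold Spec_compute_TP_P; infer_instance

-- ===== CLAIM (what is proved, stated in full; the proofs are below) =====
def Claim_equal_compute_TP_P : Prop := ∀ (guessed : List String) (correct : List String), Dom_compute_TP_P guessed correct → Pre_compute_TP_P guessed correct → Spec_compute_TP_P guessed correct (compute_TP_P guessed correct)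

-- ===== LEMMAS AND PROOFS =====

theorem not_B_of_I (s : String) (h : pvHeadIs s 'I' = true) : ¬ pvHeadIs s 'B' = true := by
  simp [pvHeadIs] at *; simp [h]

theorem innerScanA_fst (guessed correct : List String) (e : Nat) :
    ∀ found, (innerScanA guessed correct (e + 1) found).1 = chunkEndB guessed e + 1 := by
  fun_induction chunkEndB guessed e with
  | case1 e h1 h2 ih =>
    intro found
    rw [innerScanA, if_pos h1, if_pos h2]
    exact ih _
  | case2 e h1 h2 =>
    intro found
    rw [innerScanA, if_pos h1, if_neg h2]
  | case3 e h1 =>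
    intro found
    rw [innerScanA, if_neg h1]

theorem spanMatchesB_cons (guessed correct : List String) (k e : Nat) (h : k ≤ e) :
    spanMatchesB guessed correct k e
      = ((guessed.getD k "" == correct.getD k "") && spanMatchesB guessed correct (k + 1) e) := by
  rw [spanMatchesB, if_pos h]
  cases hb : (guessed.getD k "" == correct.getD k "") <;> simp [hb]

theorem spanMatchesB_nil (guessed correct : List String) (k e : Nat) (h : ¬ k ≤ e) :
    spanMatchesB guessed correct k e = true := by
  rw [spanMatchesB, if_neg h]

theorem innerScanA_snd (guessed correct : List String) (e : Nat) :
    ∀ found, (innerScanA guessed correct (e + 1) found).2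
      = (found && spanMatchesB guessed correct (e + 1) (chunkEndB guessed e)) := by
  fun_induction chunkEndB guessed e with
  | case1 e h1 h2 ih =>
    intro found
    rw [innerScanA, if_pos h1, if_pos h2, ih]
    have hle : e + 1 ≤ chunkEndB guessed (e + 1) := chunkEndB_ge guessed (e + 1)
    rw [spanMatchesB_cons guessed correct (e + 1) _ hle]
    cases hb : (guessed.getD (e + 1) "" == correct.getD (e + 1) "") <;> cases found <;> simp [hb]
  | case2 e h1 h2 =>
    intro found
    rw [innerScanA, if_pos h1, if_neg h2,
      spanMatchesB_nil guessed correct (e + 1) e (by omega)]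
    simp
  | case3 e h1 =>
    intro found
    rw [innerScanA, if_neg h1, spanMatchesB_nil guessed correct (e + 1) e (by omega)]
    simp

theorem spansB_skip (guessed : List String) (e : Nat) :
    spansB guessed (e + 1) = spansB guessed (chunkEndB guessed e + 1) := by
  fun_induction chunkEndB guessed e with
  | case1 e h1 h2 ih =>
    rw [← ih, spansB, if_pos h1, if_neg (not_B_of_I _ h2)]
  | case2 e h1 h2 => rfl
  | case3 e h1 => rfl
def cntGood (guessed correct : List String) : List (Nat × Nat) → Int
  | [] => 0
  | p :: t => (if spanOkB guessed correct p.1 p.2 then 1 else 0) + cntGood guessed correct t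

theorem foldl_cntGood (guessed correct : List String) (l : List (Nat × Nat)) :
    ∀ a : Int,
      l.foldl (fun acc p => if spanOkB guessed correct p.1 p.2 then acc + 1 else acc) a
        = a + cntGood guessed correct l := by
  induction l with
  | nil => intro a; simp [cntGood]
  | cons p t ih =>
    intro a
    simp only [List.foldl_cons, cntGood, ih]
    split_ifs <;> ring

theorem loopA_eq (guessed correct : List String) (idx : Nat) (a b : Int) :
    loopA guessed correct idx a b
      = (a + cntGood guessed correct (spansB guessed idx),
         b + ((spansB guessed idx).length : Int)) := by
  fun_induction loopA guessed correct idx a b with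
  | case1 idx a b h1 h2 h3 r found ih =>
    have hge := chunkEndB_ge guessed idx
    have hfst : r.1 = chunkEndB guessed idx + 1 := innerScanA_fst guessed correct idx true
    have hsnd : r.2 = spanMatchesB guessed correct (idx + 1) (chunkEndB guessed idx) := by
      have := innerScanA_snd guessed correct idx true
      simpa using this
    have hfound : found
        = (if r.1 < guessed.length then
             (if pvHeadIs (correct.getD r.1 "") 'I' = true then false else r.2)
           else r.2) := rfl
    simp only [dite_eq_ite] at ih
    rw [ih]
    set E := chunkEndB guessed idx with hE
    have hspan : spansB guessed idx = (idx, E) :: spansB guessed (E + 1) := by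
      rw [spansB, if_pos h1, if_pos h2]
    rw [hspan]
    have hok : spanOkB guessed correct idx E = found := by
      rw [hfound, hfst, hsnd]
      rw [spanOkB]
      rw [spanMatchesB_cons guessed correct idx E hge, h3]
      cases hm : spanMatchesB guessed correct (idx + 1) E <;>
        by_cases hr : E + 1 < guessed.length <;>
        cases hh : pvHeadIs (correct.getD (E + 1) "") 'I' <;>
        simp [hm, hr, hh]
    rw [hfst]
    simp only [cntGood, List.length_cons, hok]
    refine Prod.ext ?_ ?_
    · simp only []
      split_ifs <;> push_cast <;> ring
    · simp only []
      push_cast; ring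
  | case2 idx a b h1 h2 h3 ih =>
    have hge := chunkEndB_ge guessed idx
    rw [ih, spansB_skip guessed idx]
    have hspan : spansB guessed idx
        = (idx, chunkEndB guessed idx) :: spansB guessed (chunkEndB guessed idx + 1) := by
      rw [spansB, if_pos h1, if_pos h2]
    rw [hspan]
    have hok : spanOkB guessed correct idx (chunkEndB guessed idx) = false := by
      rw [spanOkB, spanMatchesB_cons guessed correct idx _ hge]
      simp only [Bool.not_eq_true] at h3
      rw [h3]
      simp
    simp only [cntGood, List.length_cons, hok]
    refine Prod.ext ?_ ?_
    · simp only []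
      push_cast; ring
    · simp only []
      push_cast; ring
  | case3 idx a b h1 h2 ih =>
    rw [ih]
    have hspan : spansB guessed idx = spansB guessed (idx + 1) := by
      rw [spansB, if_pos h1, if_neg h2]
    rw [hspan]
  | case4 idx a b h1 =>
    rw [spansB, if_neg h1]
    simp [cntGood]


-- ===== VERDICT (by name: the statement is the Claim_ definition above) =====
theorem compute_TP_P_spec : Claim_equal_compute_TP_P := by
  intro guessed correct _ _
  unfold Spec_compute_TP_P
  simp only [compute_TP_P, compute_TP_P_alt]
  rw [loopA_eq, foldl_cntGood]
  simp
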